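-- pv_equiv track=rewrite | github.com/joqjoq966/Algorithm_python | Codeforces/Round #692/A.py | bad
-- ===== SOURCE A (Python) =====
-- def bad(s):
-- 	r = 0
-- 	for i in reversed(range(len(s))):
-- 		if s[i]==')':
-- 			r +=1
-- 		else:
-- 			return r
-- 	return r
-- ===== SOURCE B (Python) =====
-- def bad(s):
-- 	r = 0
-- 	for c in s:
-- 		r = r + 1 if c == ')' else 0
-- 	return r
-- ===== Notes on version B (the rewrite author's own statement) =====
-- stated objective: alternative
-- what changed: B makes a single FORWARD pass over the string with an accumulator that increments on ')' and resets to 0 on any other character, so the final value is the length of the trailing ')' run; A scans BACKWARD from the end with an early return.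
import Mathlib
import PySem

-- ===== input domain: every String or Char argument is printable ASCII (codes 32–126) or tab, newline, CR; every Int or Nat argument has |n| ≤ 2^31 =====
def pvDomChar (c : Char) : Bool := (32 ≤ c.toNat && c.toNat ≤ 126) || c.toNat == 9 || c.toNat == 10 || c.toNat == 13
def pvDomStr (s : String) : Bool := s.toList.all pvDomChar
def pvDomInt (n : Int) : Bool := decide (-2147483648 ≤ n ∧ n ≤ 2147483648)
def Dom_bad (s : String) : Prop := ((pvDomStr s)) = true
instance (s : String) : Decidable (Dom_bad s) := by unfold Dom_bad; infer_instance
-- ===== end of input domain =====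

-- B replaces A's backward scan with early return by a single forward pass whose
-- accumulator resets to 0 on a non-')' character: alternative decomposition, same cost.


-- ===== PORT A =====
-- A iterates indices from len(s)-1 down to 0, counting ')' and returning early at
-- the first non-')'; iterating over the reversed character list is that traversal.
def badLoop : List Char → Int → Int
  | [], r => r
  | c :: cs, r => if c = ')' then badLoop cs (r + 1) else r

def bad (s : String) : Int := badLoop s.toList.reverse 0

-- ===== PORT B =====
-- B's forward pass: r = r + 1 if c == ')' else 0, over the characters in order.
def bad_alt (s : String) : Int :=
  s.toList.foldl (fun r c => if c = ')' then r + 1 else 0) 0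

-- ===== PRECONDITION & SPEC =====
def Spec_bad (s : String) (out : Int) : Prop := out = bad_alt s
instance (s : String) (out : Int) : Decidable (Spec_bad s out) := by unfold Spec_bad; infer_instance

-- ===== CLAIM =====
def Claim_equal_bad : Prop := ∀ (s : String), Dom_bad s → Spec_bad s (bad s)

-- ===== LEMMAS AND PROOFS =====

theorem badLoop_takeWhile (l : List Char) (r : Int) :
    badLoop l r = r + (l.takeWhile (fun c => c = ')')).length := by
  induction l generalizing r with
  | nil => simp [badLoop]
  | cons c cs ih =>
    by_cases h : c = ')'
    · simp [badLoop, h, List.takeWhile, ih]; ring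
    · simp [badLoop, h, List.takeWhile]

theorem foldl_trailing (l : List Char) (r : Int) :
    l.foldl (fun r c => if c = ')' then r + 1 else 0) r =
      if l.all (fun c => c = ')') then r + l.length
      else ((l.reverse.takeWhile (fun c => c = ')')).length : Int) := by
  induction l generalizing r with
  | nil => simp
  | cons c cs ih =>
    simp only [List.foldl_cons, ih, List.all_cons, List.reverse_cons]
    by_cases hc : c = ')'
    · by_cases hcs : cs.all (fun c => c = ')') = true
      · simp [hc, hcs]; push_cast; ring
      · have hrev : ¬ cs.reverse.all (fun c => decide (c = ')')) = true := by
          intro h; apply hcs; simpa using h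
        have hne : (cs.reverse.takeWhile (fun c => decide (c = ')'))).length ≠ cs.length := by
          intro hlen
          apply hrev
          have hpref := List.takeWhile_prefix (p := fun c => decide (c = ')')) (l := cs.reverse)
          have heq := hpref.eq_of_length (by simpa using hlen)
          exact List.all_eq_true.mpr (List.takeWhile_eq_self_iff.mp heq)
        simp only [hc, if_true, hcs, decide_true, Bool.true_and]
        rw [List.takeWhile_append]
        simp [hne]
    · by_cases hcs : cs.all (fun c => c = ')') = true
      · have hrev : cs.reverse.all (fun c => decide (c = ')')) = true := by simpa using hcs
        have hself : cs.reverse.takeWhile (fun c => decide (c = ')')) = cs.reverse :=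
          List.takeWhile_eq_self_iff.mpr (by simpa using hrev)
        simp only [hc, if_false, hcs, decide_false, Bool.false_and]
        rw [List.takeWhile_append]
        simp [hself, List.takeWhile, hc]
      · have hrev : ¬ cs.reverse.all (fun c => decide (c = ')')) = true := by
          intro h; apply hcs; simpa using h
        have hne : (cs.reverse.takeWhile (fun c => decide (c = ')'))).length ≠ cs.length := by
          intro hlen
          apply hrev
          have hpref := List.takeWhile_prefix (p := fun c => decide (c = ')')) (l := cs.reverse)
          have heq := hpref.eq_of_length (by simpa using hlen)
          exact List.all_eq_true.mpr (List.takeWhile_eq_self_iff.mp heq)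
        simp only [hc, if_false, hcs, decide_false, Bool.false_and]
        rw [List.takeWhile_append]
        simp [hne]

theorem bad_eq (s : String) : bad s = bad_alt s := by
  simp only [bad, bad_alt, badLoop_takeWhile, foldl_trailing]
  by_cases h : s.toList.all (fun c => c = ')') = true
  · have : s.toList.reverse.takeWhile (fun c => decide (c = ')')) = s.toList.reverse :=
      List.takeWhile_eq_self_iff.mpr (by simpa using h)
    simp [h, this]
  · simp [h]

-- ===== VERDICT =====
theorem bad_spec : Claim_equal_bad := by
  intro s _
  unfold Spec_bad
  exact bad_eq s
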